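-- pv_equiv track=rewrite | github.com/yungchunw/order-extract-api | information_extract.py | get_format_of_poNum
-- ===== SOURCE A (Python) =====
-- def get_format_of_poNum(custID, custPoNumber_list):
--     """
--     generating formats of custPoNumber
--
--     Arguments:
--         custID -- cust id
--         custPoNumber_list -- a list of custPoNumber history in ERP
--
--     Returns:
--         formats of custPoNumber
--
--     """
--
--     poNum_his = custPoNumber_list[custID]
--     # dict by length
--     length_dict = {}
--     for poNum in poNum_his:
--         if len(poNum) > 3:
--             if len(poNum) not in length_dict.keys():
--                 length_dict[len(poNum)] = [poNum]
--             else: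
--                 length_dict[len(poNum)].append(poNum)
--     # get format
--     po_num_format = {}
--     for length in length_dict:
--         form = []
--         for i in range(length):
--             typeOfchar = ''
--             for poNum in length_dict[length]:
--                 char = poNum[i]
--                 if typeOfchar == '':  # first time
--                     if char == '-':
--                         typeOfchar = char
--                     elif char.isdigit():
--                         typeOfchar = '\\d'
--                     else:
--                         typeOfchar = '\\D'
--                 else:
--                     if (char == '-') & (typeOfchar != '-'):  # 可能為不同格式 or 不同長度
--                         typeOfchar = '\\D'
--                     elif (char.isdigit() & (typeOfchar == '\\d' or typeOfchar.isdigit())) & (char != typeOfchar):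
--                         typeOfchar = '\\d'
--                     elif char != typeOfchar:
--                         typeOfchar = '\\D'
--             form.append(typeOfchar)
--         po_num_format[length] = form
--     return po_num_format
-- ===== SOURCE B (Python) =====
-- def get_format_of_poNum(custID, custPoNumber_list):
--     """Same result as A: per-length regex-ish format from PO number history.
--     Simpler: transpose each length group into columns and classify each column
--     with whole-column predicates instead of a character-by-character state machine."""
--     poNum_his = custPoNumber_list[custID]
--     length_dict = {}
--     for poNum in poNum_his:
--         if len(poNum) > 3:
--             length_dict.setdefault(len(poNum), []).append(poNum)
--     return {
--         length: ['-' if all(c == '-' for c in col)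
--                  else '\\d' if all(c.isdigit() for c in col)
--                  else '\\D'
--                  for col in zip(*group)]
--         for length, group in length_dict.items()
--     }
-- ===== Notes on version B (the rewrite author's own statement) =====
-- stated objective: simpler
-- what changed: Replaces the stateful per-character fold ('' -> '-'/'\d'/'\D' state machine over the group for each position) with an explicit transpose of each length group into columns followed by whole-column predicate classification (all '-' -> '-', all digits -> '\d', else '\D'), built as comprehensions.
import Mathlib
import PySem

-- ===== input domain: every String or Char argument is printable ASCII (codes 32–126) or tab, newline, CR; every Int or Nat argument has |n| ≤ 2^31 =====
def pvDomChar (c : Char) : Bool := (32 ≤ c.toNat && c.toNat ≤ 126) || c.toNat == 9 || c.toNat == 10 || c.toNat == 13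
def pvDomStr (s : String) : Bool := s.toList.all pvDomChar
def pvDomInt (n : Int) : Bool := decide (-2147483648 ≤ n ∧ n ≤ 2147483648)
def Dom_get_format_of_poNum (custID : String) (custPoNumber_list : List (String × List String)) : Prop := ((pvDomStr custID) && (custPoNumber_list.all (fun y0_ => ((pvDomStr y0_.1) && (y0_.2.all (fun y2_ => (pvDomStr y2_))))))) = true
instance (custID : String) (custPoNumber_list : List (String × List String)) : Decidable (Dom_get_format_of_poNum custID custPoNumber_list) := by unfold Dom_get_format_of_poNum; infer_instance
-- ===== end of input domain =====

-- B replaces A's per-character state machine by an explicit transpose into columns plus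
-- whole-column predicate classification (objective: simpler); same return value on Pre_.

-- ===== PORT A =====
-- Python strings holding the evolving `typeOfchar` state are modelled as List Char
-- (PySem convention); appended format strings are rebuilt with String.ofList.
-- One update of `typeOfchar` from `char` (A's inner if/elif chain, branch for branch).
def pvStepA (typeOfchar : List Char) (char : Char) : List Char :=
  if typeOfchar = [] then  -- first time
    if char = '-' then [char]
    else if PySem.Chars.isdigit char then ['\\', 'd']
    else ['\\', 'D']
  else
    if char = '-' ∧ typeOfchar ≠ ['-'] then ['\\', 'D']
    else if (PySem.Chars.isdigit char ∧ (typeOfchar = ['\\', 'd'] ∨ PySem.Chars.strIsdigit typeOfchar)) ∧ [char] ≠ typeOfchar then ['\\', 'd']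
    else if [char] ≠ typeOfchar then ['\\', 'D']
    else typeOfchar

-- A's first loop: the length dict (check `not in keys`, then start or append).
def pvLenDictA (poNum_his : List String) : PySem.Dict Int (List String) :=
  poNum_his.foldl (fun d poNum =>
    if PySem.Str.len poNum > 3 then
      if d.contains (PySem.Str.len poNum) = false then
        d.insert (PySem.Str.len poNum) [poNum]
      else
        d.insert (PySem.Str.len poNum) (d.getD (PySem.Str.len poNum) [] ++ [poNum])
    else d) PySem.Dict.empty

-- A's `form` for one length: for i in range(length), fold typeOfchar over the group.
-- poNum[i] is rendered total with `.getD ' '`; the loop only reads 0 ≤ i < len(poNum).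
def pvFormA (length_dict : PySem.Dict Int (List String)) (length : Int) : List String :=
  (PySem.List.pyRange 0 length 1).foldl (fun form i =>
    form ++ [String.ofList ((length_dict.getD length []).foldl
      (fun typeOfchar poNum => pvStepA typeOfchar ((PySem.Str.pyGet? poNum i).getD ' ')) [])]) []

def get_format_of_poNum (custID : String) (custPoNumber_list : List (String × List String)) : List (Int × List String) :=
  -- custPoNumber_list[custID]; KeyError (lookup none) is excluded by Pre_
  let poNum_his := ((PySem.Dict.mk custPoNumber_list).get? custID).getD []
  let length_dict := pvLenDictA poNum_his
  (length_dict.keys.foldl (fun pf length =>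
    pf.insert length (pvFormA length_dict length)) PySem.Dict.empty).items

-- ===== PORT B =====
-- zip(*group): peel the heads off as a column until some list is exhausted.
-- Structural fuel = length of the first list; exact, since zip stops at the
-- shortest list and the first list loses one element per step.
def pvZipStarGo (fuel : Nat) (xss : List (List Char)) : List (List Char) :=
  match fuel with
  | 0 => []
  | fuel + 1 =>
    if xss.isEmpty || xss.any List.isEmpty then []
    else xss.map (·.headD ' ') :: pvZipStarGo fuel (xss.map List.tail)

def pvZipStar (xss : List (List Char)) : List (List Char) :=
  pvZipStarGo (xss.headD []).length xss

-- classify one column by whole-column predicates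
def pvClassify (col : List Char) : String :=
  if col.all (· == '-') then String.ofList ['-']
  else if col.all PySem.Chars.isdigit then String.ofList ['\\', 'd']
  else String.ofList ['\\', 'D']

-- B's length dict: setdefault(len, []).append(poNum)
def pvLenDictB (poNum_his : List String) : PySem.Dict Int (List String) :=
  poNum_his.foldl (fun d poNum =>
    if PySem.Str.len poNum > 3 then
      d.insert (PySem.Str.len poNum) (d.getD (PySem.Str.len poNum) [] ++ [poNum])
    else d) PySem.Dict.empty

def get_format_of_poNum_alt (custID : String) (custPoNumber_list : List (String × List String)) : List (Int × List String) :=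
  let poNum_his := ((PySem.Dict.mk custPoNumber_list).get? custID).getD []
  -- the result dict comprehension keys each (distinct) length once, so its items are this map
  (pvLenDictB poNum_his).items.map (fun p =>
    (p.1, (pvZipStar (p.2.map String.toList)).map pvClassify))

-- ===== PRECONDITION & SPEC =====
-- Pre_ excludes exactly the inputs where A raises KeyError: custID not a key of the dict.
def Pre_get_format_of_poNum (custID : String) (custPoNumber_list : List (String × List String)) : Prop :=
  custID ∈ custPoNumber_list.map Prod.fst
instance (custID : String) (custPoNumber_list : List (String × List String)) : Decidable (Pre_get_format_of_poNum custID custPoNumber_list) := by unfold Pre_get_format_of_poNum; infer_instance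

def pvWitness_get_format_of_poNum : String × (List (String × List String)) :=
  ("x", [("x", ["12-ab", "1234"])])

def Spec_get_format_of_poNum (custID : String) (custPoNumber_list : List (String × List String)) (out : List (Int × List String)) : Prop := out = get_format_of_poNum_alt custID custPoNumber_list
instance (custID : String) (custPoNumber_list : List (String × List String)) (out : List (Int × List String)) : Decidable (Spec_get_format_of_poNum custID custPoNumber_list out) := by unfold Spec_get_format_of_poNum; infer_instance

-- ===== CLAIM (what is proved, stated in full; the proofs are below) =====
def Claim_equal_get_format_of_poNum : Prop := ∀ (custID : String) (custPoNumber_list : List (String × List String)), Dom_get_format_of_poNum custID custPoNumber_list → Pre_get_format_of_poNum custID custPoNumber_list → Spec_get_format_of_poNum custID custPoNumber_list (get_format_of_poNum custID custPoNumber_list)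

-- ===== LEMMAS AND PROOFS =====

-- the two length-dict loop bodies are extensionally equal (start-vs-append collapses)
theorem pvLenDict_eq_core :
    (fun (d : PySem.Dict Int (List String)) poNum =>
      if PySem.Str.len poNum > 3 then
        if d.contains (PySem.Str.len poNum) = false then
          d.insert (PySem.Str.len poNum) [poNum]
        else
          d.insert (PySem.Str.len poNum) (d.getD (PySem.Str.len poNum) [] ++ [poNum])
      else d)
    = (fun (d : PySem.Dict Int (List String)) poNum =>
      if PySem.Str.len poNum > 3 then
        d.insert (PySem.Str.len poNum) (d.getD (PySem.Str.len poNum) [] ++ [poNum])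
      else d) := by
  funext d p
  by_cases h3 : PySem.Str.len p > 3
  · rw [if_pos h3, if_pos h3]
    by_cases hc : d.contains (PySem.Str.len p)
    · rw [if_neg (by simp only [hc]; simp)]
    · rw [if_pos (by simpa using hc), PySem.Dict.getD_of_not_contains (h := by simpa using hc)]
      simp
  · rw [if_neg h3, if_neg h3]

-- the two length-dict loops compute the same dict
theorem pvLenDict_eq (his : List String) : pvLenDictA his = pvLenDictB his := by
  unfold pvLenDictA pvLenDictB
  rw [pvLenDict_eq_core]

-- invariant of the length dict: keys are unique, every group is nonempty,
-- and every member of the group keyed by L has Python length L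
def pvInv (d : PySem.Dict Int (List String)) : Prop :=
  d.keys.Nodup ∧ ∀ p ∈ d.items, p.2 ≠ [] ∧ ∀ s ∈ p.2, PySem.Str.len s = p.1

theorem pvInv_step (d : PySem.Dict Int (List String)) (p : String) (h : pvInv d) :
    pvInv (if PySem.Str.len p > 3 then
        d.insert (PySem.Str.len p) (d.getD (PySem.Str.len p) [] ++ [p])
      else d) := by
  by_cases h3 : PySem.Str.len p > 3
  · rw [if_pos h3]
    refine ⟨PySem.Dict.nodup_keys_insert _ _ _ h.1, ?_⟩
    intro q hq
    rw [PySem.Dict.mem_items_insert] at hq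
    rcases hq with rfl | ⟨hq, _⟩
    · refine ⟨by simp, ?_⟩
      intro s hs
      simp only [List.mem_append, List.mem_singleton] at hs
      rcases hs with hs | rfl
      · cases hg : d.get? (PySem.Str.len p) with
        | none => rw [PySem.Dict.getD_of_get?_eq_none d [] hg] at hs; cases hs
        | some v0 =>
          rw [PySem.Dict.getD_of_get?_eq_some (h := hg)] at hs
          exact (h.2 _ (PySem.Dict.mem_items_of_get?_eq_some d hg)).2 s hs
      · rfl
    · exact h.2 q hq
  · rwa [if_neg h3]

theorem pvInv_fold (l : List String) : ∀ d, pvInv d →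
    pvInv (l.foldl (fun d poNum =>
      if PySem.Str.len poNum > 3 then
        d.insert (PySem.Str.len poNum) (d.getD (PySem.Str.len poNum) [] ++ [poNum])
      else d) d) := by
  induction l with
  | nil => exact fun d h => h
  | cons p rest ih => exact fun d h => ih _ (pvInv_step d p h)

theorem pvInv_lenDictB (his : List String) : pvInv (pvLenDictB his) :=
  pvInv_fold his _ ⟨by simp, by simp [PySem.Dict.empty]⟩

-- pvZipStar on a nonempty rectangle of height n is the list of its n columns
theorem pvZipStarGo_spec (n : Nat) : ∀ (fuel : Nat) (css : List (List Char)), css ≠ [] →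
    (∀ cs ∈ css, cs.length = n) → n ≤ fuel →
    pvZipStarGo fuel css = (List.range n).map (fun k => css.map (fun cs => cs.getD k ' ')) := by
  induction n with
  | zero =>
    intro fuel css hne hlen _
    cases fuel with
    | zero => rfl
    | succ fuel =>
      rw [pvZipStarGo]
      have hany : css.any List.isEmpty = true := by
        cases css with
        | nil => exact absurd rfl hne
        | cons x rest =>
          have hx : x = [] := by
            have := hlen x (by simp)
            simpa using List.length_eq_zero_iff.mp this
          simp [hx]
      simp [hany]
  | succ n ih =>
    intro fuel css hne hlen hfuel
    cases fuel with
    | zero => omega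
    | succ fuel =>
      have hguard : (css.isEmpty || css.any List.isEmpty) = false := by
        simp only [Bool.or_eq_false_iff, List.isEmpty_eq_false_iff, List.any_eq_false]
        refine ⟨hne, ?_⟩
        intro cs hcs
        have := hlen cs hcs
        cases cs with
        | nil => simp at this
        | cons a as => simp
      rw [pvZipStarGo, if_neg (by simp [hguard]),
        ih fuel (css.map List.tail) (by simpa using hne)
          (by
            intro cs hcs
            simp only [List.mem_map] at hcs
            obtain ⟨c0, hc0, rfl⟩ := hcs
            have := hlen c0 hc0
            simp [List.length_tail, this])
          (by omega),
        List.range_succ_eq_map, List.map_cons, List.map_map]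
      refine congrArg₂ List.cons ?_ ?_
      · exact List.map_congr_left fun cs _ => by cases cs <;> rfl
      · refine List.map_congr_left fun k _ => ?_
        show (css.map List.tail).map (fun cs => cs.getD k ' ') = css.map (fun cs => cs.getD (k + 1) ' ')
        rw [List.map_map]
        exact List.map_congr_left fun cs _ => by cases cs <;> rfl

theorem pvZipStar_spec (n : Nat) (css : List (List Char)) (hne : css ≠ [])
    (hlen : ∀ cs ∈ css, cs.length = n) :
    pvZipStar css = (List.range n).map (fun k => css.map (fun cs => cs.getD k ' ')) := by
  cases css with
  | nil => exact absurd rfl hne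
  | cons x rest =>
    have hx : x.length = n := hlen x (by simp)
    unfold pvZipStar
    rw [List.headD_cons, hx]
    exact pvZipStarGo_spec n n (x :: rest) (by simp) hlen le_rfl

theorem pvStepA_nil (c : Char) : pvStepA [] c =
    if c = '-' then ['-'] else if PySem.Chars.isdigit c then ['\\', 'd'] else ['\\', 'D'] := by
  by_cases hc : c = '-' <;> simp [pvStepA, hc]

theorem pvStepA_dash (c : Char) : pvStepA ['-'] c =
    if c = '-' then ['-'] else ['\\', 'D'] := by
  by_cases hc : c = '-' <;>
    simp [pvStepA, hc, (by decide : PySem.Chars.strIsdigit ['-'] = false)]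

theorem pvStepA_D (c : Char) : pvStepA ['\\', 'D'] c = ['\\', 'D'] := by
  by_cases hc : c = '-' <;>
    simp [pvStepA, hc, (by decide : PySem.Chars.strIsdigit ['\\', 'D'] = false)]

theorem pvStepA_d (c : Char) : pvStepA ['\\', 'd'] c =
    if PySem.Chars.isdigit c then ['\\', 'd'] else ['\\', 'D'] := by
  by_cases hc : c = '-'
  · simp [pvStepA, hc, (by decide : PySem.Chars.isdigit '-' = false)]
  · by_cases hd : PySem.Chars.isdigit c <;> simp [pvStepA, hc, hd]

theorem pvFold_D (col : List Char) : col.foldl pvStepA ['\\', 'D'] = ['\\', 'D'] := by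
  induction col with
  | nil => rfl
  | cons c rest ih => rw [List.foldl_cons, pvStepA_D, ih]

theorem pvFold_dash (col : List Char) :
    col.foldl pvStepA ['-'] = if col.all (· == '-') then ['-'] else ['\\', 'D'] := by
  induction col with
  | nil => rfl
  | cons c rest ih =>
    rw [List.foldl_cons, pvStepA_dash]
    by_cases hc : c = '-'
    · simp [hc, ih]
    · simp [hc, pvFold_D]

theorem pvFold_d (col : List Char) :
    col.foldl pvStepA ['\\', 'd'] = if col.all PySem.Chars.isdigit then ['\\', 'd'] else ['\\', 'D'] := by
  induction col with
  | nil => rfl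
  | cons c rest ih =>
    rw [List.foldl_cons, pvStepA_d]
    by_cases hd : PySem.Chars.isdigit c
    · simp [hd, ih]
    · simp [hd, pvFold_D]

theorem pvFold_classify (col : List Char) (h : col ≠ []) :
    String.ofList (col.foldl pvStepA []) = pvClassify col := by
  cases col with
  | nil => exact absurd rfl h
  | cons c rest =>
    rw [List.foldl_cons, pvStepA_nil]
    unfold pvClassify
    by_cases hc : c = '-'
    · rw [if_pos hc, pvFold_dash]
      by_cases hr : rest.all (· == '-')
      · simp [hc, hr]
      · simp [hc, hr, (by decide : PySem.Chars.isdigit '-' = false)]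
    · rw [if_neg hc]
      by_cases hd : PySem.Chars.isdigit c
      · rw [if_pos hd, pvFold_d]
        have hcol : (c :: rest).all (· == '-') = false := by
          simp [List.all_cons, hc]
        by_cases hr : rest.all PySem.Chars.isdigit
        · simp [hcol, hr, hd]
        · simp [hcol, hr, hd]
      · rw [if_neg hd, pvFold_D]
        have hcol : (c :: rest).all (· == '-') = false := by
          have : ¬ c = '-' := hc
          simp [List.all_cons, hc]
        have hcol2 : (c :: rest).all PySem.Chars.isdigit = false := by
          simp [List.all_cons, hd]
        simp [hcol, hcol2]

-- one group: A's range/fold form equals B's transpose-and-classify form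
theorem pvGroup_eq (L : Int) (grp : List String) (hne : grp ≠ [])
    (hlen : ∀ s ∈ grp, PySem.Str.len s = L) (d : PySem.Dict Int (List String))
    (hd : d.getD L [] = grp) :
    pvFormA d L = (pvZipStar (grp.map String.toList)).map pvClassify := by
  obtain ⟨s0, hs0⟩ := List.exists_mem_of_ne_nil grp hne
  have hL0 : 0 ≤ L := by
    have := hlen s0 hs0
    rw [PySem.Str.len_eq] at this
    omega
  have hlen' : ∀ cs ∈ grp.map String.toList, cs.length = L.toNat := by
    intro cs hcs
    simp only [List.mem_map] at hcs
    obtain ⟨s, hs, rfl⟩ := hcs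
    have := hlen s hs
    rw [PySem.Str.len_eq] at this
    omega
  unfold pvFormA
  rw [hd, PySem.List.foldl_append_singleton_eq_map, List.nil_append,
    pvZipStar_spec L.toNat (grp.map String.toList) (by simpa using hne) hlen',
    PySem.List.pyRange_one, List.map_map, List.map_map,
    (by omega : (L - 0).toNat = L.toNat)]
  refine List.map_congr_left fun k _ => ?_
  show String.ofList (grp.foldl
      (fun t p => pvStepA t ((PySem.Str.pyGet? p (0 + (k:Int))).getD ' ')) [])
    = pvClassify ((grp.map String.toList).map (fun cs => cs.getD k ' '))
  rw [← pvFold_classify _ (by simpa using hne)]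
  refine congrArg String.ofList ?_
  rw [List.foldl_map, List.foldl_map]
  have hfun : (fun (t : List Char) (p : String) =>
        pvStepA t ((PySem.Str.pyGet? p (0 + (k:Int))).getD ' '))
      = (fun (t : List Char) (p : String) => pvStepA t (p.toList.getD k ' ')) := by
    funext t p
    rw [zero_add, PySem.Str.pyGet?_natCast, ← List.getD_eq_getElem?_getD]
  rw [hfun]

theorem get_format_of_poNum_eq (custID : String) (lst : List (String × List String)) :
    get_format_of_poNum custID lst = get_format_of_poNum_alt custID lst := by
  simp only [get_format_of_poNum, get_format_of_poNum_alt, pvLenDict_eq]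
  have hinv := pvInv_lenDictB (((PySem.Dict.mk lst).get? custID).getD [])
  set d := pvLenDictB (((PySem.Dict.mk lst).get? custID).getD []) with hdd
  rw [PySem.Dict.items_foldl_insert_fresh d.keys (fun a => a) (fun a => pvFormA d a)
    PySem.Dict.empty (fun a _ => by simp) (by simpa using hinv.1)]
  simp only [PySem.Dict.empty, List.nil_append, PySem.Dict.keys, List.map_map]
  refine List.map_congr_left fun p hp => ?_
  show (p.1, pvFormA d p.1) = (p.1, (pvZipStar (p.2.map String.toList)).map pvClassify)
  obtain ⟨hne, hlen⟩ := hinv.2 p hp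
  have hgetD : d.getD p.1 [] = p.2 :=
    PySem.Dict.getD_of_mem_items d (by exact hp) hinv.1 []
  rw [pvGroup_eq p.1 p.2 hne hlen d hgetD]

-- ===== VERDICT (by name: the statement is the Claim_ definition above) =====
theorem get_format_of_poNum_spec : Claim_equal_get_format_of_poNum := by
  intro custID lst _ _
  unfold Spec_get_format_of_poNum
  exact get_format_of_poNum_eq custID lst
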